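-- pv_equiv track=rewrite | github.com/kimD0ngjun/backjoon_programmers | 백준/Gold/1759. 암호 만들기/암호 만들기.py | dfs
-- ===== SOURCE A (Python) =====
-- def dfs(char_list, length):
--     stack = [[char_list, '']] # remaining, current_string
--     vowels = ['a', 'e', 'i', 'o', 'u']
--     result = []
--
--     while stack:
--         remaining, current_string = stack.pop()
--         vowel_count = sum(1 for char in current_string if char in vowels)
--
--         if len(current_string) == length and 1 <= vowel_count <= len(current_string) - 2:
--             result.append(current_string)
--             continue
--
--         for i in range(len(remaining)):
--             # 이미 앞전의 애들은 전단계에서 훑었을 테니까 굳이 조회 필요 x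
--             new_remaining = remaining[i+1:]
--             new_current_string = current_string + remaining[i]
--
--             stack.append([new_remaining, new_current_string])
--
--     return result
-- ===== SOURCE B (Python) =====
-- # Simpler: recursion over indices in forward order (output reversed at the end)
-- # with an incrementally maintained vowel count, instead of an explicit stack of
-- # (sliced-copy, string) pairs that recounts vowels at every pop.
-- def dfs(char_list, length):
--     vowels = ('a', 'e', 'i', 'o', 'u')
--     out = []
--
--     def go(start, cur, vc):
--         if len(cur) == length and 1 <= vc <= len(cur) - 2:
--             out.append(cur)
--             return
--         for j in range(start, len(char_list)):
--             s = char_list[j]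
--             go(j + 1, cur + s, vc + sum(1 for ch in s if ch in vowels))
--
--     go(0, '', 0)
--     return out[::-1]
-- ===== Notes on version B (the rewrite author's own statement) =====
-- stated objective: alternative
-- what changed: Replaces the explicit LIFO stack of (sliced remaining-list copy, string) pairs that recounts the vowels of the whole current string at every pop by a forward-order recursion over start indices into the original list that carries the vowel count incrementally and reverses the collected output once at the end.
import Mathlib
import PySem

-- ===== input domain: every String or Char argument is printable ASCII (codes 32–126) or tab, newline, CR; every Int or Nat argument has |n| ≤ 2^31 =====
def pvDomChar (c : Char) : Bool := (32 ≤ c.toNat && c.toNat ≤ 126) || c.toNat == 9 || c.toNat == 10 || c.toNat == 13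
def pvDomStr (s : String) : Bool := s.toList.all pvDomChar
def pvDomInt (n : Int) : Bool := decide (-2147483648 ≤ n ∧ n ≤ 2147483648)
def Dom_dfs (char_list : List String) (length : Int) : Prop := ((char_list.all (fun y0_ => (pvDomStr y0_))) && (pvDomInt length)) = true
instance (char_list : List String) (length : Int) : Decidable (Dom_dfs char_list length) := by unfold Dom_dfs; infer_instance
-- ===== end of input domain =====

-- B replaces A's explicit stack of (sliced-copy remaining, string) pairs, which recounts the
-- vowels of the whole current string at every pop, by a forward-order recursion over indices
-- carrying an incremental vowel count, reversing the collected output once at the end.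

-- ===== PORT A =====
-- vowel_count = sum(1 for char in s if char in vowels)  (both Pythons compute this same sum)
def pvVowelCount (s : String) : Int :=
  s.toList.foldl (fun acc c => if c ∈ ['a', 'e', 'i', 'o', 'u'] then acc + 1 else acc) 0

-- the inner 'for i in range(len(remaining))' loop body: the pairs pushed (in push order)
def pvChildren (remaining : List String) (cur : String) : List (List String × String) :=
  (List.range remaining.length).map (fun i => (remaining.drop (i + 1), cur ++ remaining.getD i ""))

-- termination measure for the while-loop: Σ over the stack of 2^|remaining|
def pvMeasure (stack : List (List String × String)) : Nat :=
  (stack.map (fun p => 2 ^ p.1.length)).sum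

lemma pv_sum_pow (m : Nat) :
    (((List.range m).map (fun i => 2 ^ (m - (i + 1)))).sum) + 1 = 2 ^ m := by
  induction m with
  | zero => simp
  | succ m ih =>
    rw [List.range_succ_eq_map]
    simp only [List.map_cons, List.map_map, List.sum_cons]
    have h : ((List.range m).map ((fun i => 2 ^ (m + 1 - (i + 1))) ∘ Nat.succ)).sum
        = ((List.range m).map (fun i => 2 ^ (m - (i + 1)))).sum := by
      congr 1
      apply List.map_congr_left
      intro i _
      simp only [Function.comp]
      congr 1
      omega
    rw [h]
    have h2 : m + 1 - (0 + 1) = m := by omega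
    rw [h2]
    omega

lemma pvChildren_measure (remaining : List String) (cur : String) :
    pvMeasure (pvChildren remaining cur) + 1 = 2 ^ remaining.length := by
  unfold pvMeasure pvChildren
  rw [List.map_map]
  have h : ((List.range remaining.length).map ((fun p : List String × String => 2 ^ p.1.length) ∘
      (fun i => (remaining.drop (i + 1), cur ++ remaining.getD i "")))).sum
      = ((List.range remaining.length).map (fun i => 2 ^ (remaining.length - (i + 1)))).sum := by
    congr 1
    apply List.map_congr_left
    intro i _
    simp [List.length_drop]
  rw [h, pv_sum_pow]

-- while stack: pop; test; either append to result or push the children (head of the list = top)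
def dfsLoop (length : Int) (stack : List (List String × String)) (result : List String) :
    List String :=
  match stack with
  | [] => result
  | (remaining, cur) :: rest =>
    if PySem.Str.len cur = length ∧ 1 ≤ pvVowelCount cur ∧
        pvVowelCount cur ≤ PySem.Str.len cur - 2 then
      dfsLoop length rest (result ++ [cur])
    else
      dfsLoop length ((pvChildren remaining cur).reverse ++ rest) result
termination_by pvMeasure stack
decreasing_by
  all_goals
    (have h := pvChildren_measure remaining cur;
     simp only [pvMeasure, List.map_append, List.sum_append, List.map_reverse,
       List.sum_reverse, List.map_cons, List.sum_cons] at h ⊢;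
     omega)

def dfs (char_list : List String) (length : Int) : List String :=
  dfsLoop length [(char_list, "")] []

-- ===== PORT B =====
-- go(start, cur, vc): match-test, else recurse over j in range(start, len(char_list));
-- out[::-1] at the end is the .reverse in dfs_alt
def dfsGo (char_list : List String) (length : Int) (start : Nat) (cur : String) (vc : Int) :
    List String :=
  if PySem.Str.len cur = length ∧ 1 ≤ vc ∧ vc ≤ PySem.Str.len cur - 2 then [cur]
  else
    (List.range' start (char_list.length - start)).attach.flatMap
      (fun j => dfsGo char_list length (j.1 + 1) (cur ++ char_list.getD j.1 "")
        (vc + pvVowelCount (char_list.getD j.1 "")))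
termination_by char_list.length - start
decreasing_by
  have := List.mem_range'_1.mp j.2
  omega

def dfs_alt (char_list : List String) (length : Int) : List String :=
  (dfsGo char_list length 0 "" 0).reverse

-- ===== PRECONDITION & SPEC =====
def Spec_dfs (char_list : List String) (length : Int) (out : List String) : Prop := out = dfs_alt char_list length
instance (char_list : List String) (length : Int) (out : List String) : Decidable (Spec_dfs char_list length out) := by unfold Spec_dfs; infer_instance

-- ===== CLAIM (what is proved, stated in full; the proofs are below) =====
def Claim_equal_dfs : Prop := ∀ (char_list : List String) (length : Int), Dom_dfs char_list length → Spec_dfs char_list length (dfs char_list length)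

-- ===== LEMMAS AND PROOFS =====

lemma pvChildren_mem_length {remaining : List String} {cur : String}
    {p : List String × String} (h : p ∈ pvChildren remaining cur) :
    p.1.length < remaining.length := by
  unfold pvChildren at h
  obtain ⟨i, hi, heq⟩ := List.mem_map.mp h
  subst heq
  have := List.mem_range.mp hi
  simp only [List.length_drop]
  omega

-- the strings A's loop emits from one stack entry, in emission order
def emitR (length : Int) (remaining : List String) (cur : String) : List String :=
  if PySem.Str.len cur = length ∧ 1 ≤ pvVowelCount cur ∧
      pvVowelCount cur ≤ PySem.Str.len cur - 2 then [cur]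
  else
    (pvChildren remaining cur).reverse.attach.flatMap (fun p => emitR length p.1.1 p.1.2)
termination_by remaining.length
decreasing_by
  exact pvChildren_mem_length (List.mem_reverse.mp p.2)

lemma dfsLoop_eq (length : Int) (stack : List (List String × String)) (result : List String) :
    dfsLoop length stack result = result ++ stack.flatMap (fun p => emitR length p.1 p.2) := by
  induction stack, result using dfsLoop.induct length with
  | case1 result => simp [dfsLoop]
  | case2 result remaining cur rest h ih =>
    rw [dfsLoop]
    simp only [if_pos h, List.flatMap_cons]
    rw [ih, emitR]
    rw [if_pos h]
    simp
  | case3 result remaining cur rest h ih =>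
    rw [dfsLoop]
    simp only [if_neg h, List.flatMap_cons]
    rw [ih, emitR]
    rw [if_neg h]
    simp only [List.flatMap_append, List.flatMap_subtype, List.unattach_attach]

lemma pvVowelCount_eq (s : String) :
    pvVowelCount s = ((s.toList.countP (fun c => decide (c ∈ ['a', 'e', 'i', 'o', 'u']))) : Int) := by
  unfold pvVowelCount
  have := PySem.List.foldl_count_if (fun c => decide (c ∈ (['a', 'e', 'i', 'o', 'u'] : List Char))) s.toList 0
  simpa using this

lemma pvVowelCount_append (a b : String) :
    pvVowelCount (a ++ b) = pvVowelCount a + pvVowelCount b := by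
  simp [pvVowelCount_eq, String.toList_append, List.countP_append]

lemma emit_eq_go (char_list : List String) (length : Int) :
    ∀ m start cur vc, char_list.length - start = m → vc = pvVowelCount cur →
      emitR length (char_list.drop start) cur = (dfsGo char_list length start cur vc).reverse := by
  intro m
  induction m using Nat.strong_induction_on with
  | _ m IH =>
    intro start cur vc hm hvc
    subst hvc
    rw [emitR, dfsGo]
    split_ifs with hc
    · rw [List.reverse_singleton]
    · simp only [List.flatMap_subtype, List.unattach_attach]
      rw [List.reverse_flatMap]
      unfold pvChildren
      simp only [List.length_drop, hm]
      rw [List.range'_eq_map_range]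
      simp only [← List.map_reverse, List.flatMap_map]
      apply List.flatMap_congr
      intro i hi
      have him : i < m := List.mem_range.mp (List.mem_reverse.mp hi)
      have hstart : start < char_list.length := by omega
      have hdrop : (char_list.drop start).drop (i + 1) = char_list.drop (start + (i + 1)) := by
        rw [List.drop_drop]
      have hgetD : (char_list.drop start).getD i "" = char_list.getD (start + i) "" := by
        simp [List.getD, List.getElem?_drop]
      simp only [hdrop, hgetD]
      rw [IH (char_list.length - (start + (i + 1))) (by omega) (start + (i + 1))
          (cur ++ char_list.getD (start + i) "")
          (pvVowelCount cur + pvVowelCount (char_list.getD (start + i) ""))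
          rfl (by rw [pvVowelCount_append])]
      simp [Function.comp, Nat.add_assoc]

-- ===== VERDICT (by name: the statement is the Claim_ definition above) =====
theorem dfs_spec : Claim_equal_dfs := by
  intro char_list length _
  unfold Spec_dfs dfs dfs_alt
  rw [dfsLoop_eq]
  simp only [List.flatMap_cons, List.flatMap_nil, List.append_nil, List.nil_append]
  have h0 : pvVowelCount "" = 0 := by simp [pvVowelCount]
  have := emit_eq_go char_list length (char_list.length - 0) 0 "" 0 rfl (by rw [h0])
  simpa using this
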